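-- pv_equiv track=rewrite | github.com/TheoriginalMMM/Image-Analysis | analysedimage-master/src/seed.py | to_color
-- ===== SOURCE A (Python) =====
-- def to_color(n):
--     color_str = "{0:b}".format(n)
--     size = len(color_str)
--     r, g, b = (255, 255, 255)
--     for i in range(size - 1, -1, -1):
--         if int(color_str[i]):
--             step = (size - 1 - i) % 3
--             if step == 0:
--                 r = r // 2
--             elif step == 1:
--                 g = g // 2
--             elif step == 2:
--                 b = b // 2
--
--     return b, g, r
-- ===== SOURCE B (Python) =====
-- def to_color(n):
--     # Channel c is halved once per set bit at position p with p % 3 == c.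
--     # Select those bits at once with the closed-form stride mask 0b...001001001
--     # = (8**k - 1) // 7, popcount each masked value, and shift 255 right by it.
--     k = (n.bit_length() + 2) // 3
--     m = (8 ** k - 1) // 7          # bits at positions ≡ 0 (mod 3)
--     r = 255 >> (n & m).bit_count()
--     g = 255 >> (n & (m << 1)).bit_count()
--     b = 255 >> (n & (m << 2)).bit_count()
--     return b, g, r
-- ===== Notes on version B (the rewrite author's own statement) =====
-- stated objective: simpler
-- what changed: B removes A's per-digit loop over the binary string entirely: each channel's relevant bits are selected at once with the closed-form stride mask (8**k-1)//7 (bits at positions congruent to the channel mod 3), and the channel is 255 shifted right by that masked value's popcount.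
import Mathlib
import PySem

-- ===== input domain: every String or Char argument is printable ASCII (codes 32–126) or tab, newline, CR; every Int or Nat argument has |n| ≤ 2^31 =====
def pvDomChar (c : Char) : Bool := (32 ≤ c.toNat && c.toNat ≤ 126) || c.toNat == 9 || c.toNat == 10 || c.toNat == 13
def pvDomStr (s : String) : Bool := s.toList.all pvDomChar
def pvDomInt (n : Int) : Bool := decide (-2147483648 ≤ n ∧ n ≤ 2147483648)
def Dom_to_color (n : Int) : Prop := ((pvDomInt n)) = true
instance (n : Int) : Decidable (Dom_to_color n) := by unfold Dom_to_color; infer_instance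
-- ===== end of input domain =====

-- B drops A's digit-string loop entirely: it selects each channel's bits at once with the
-- closed-form stride mask (8^k-1)//7 and computes the channel as 255 shifted right by a popcount
-- (objective: simpler — no loop, no branches).

-- ===== PORT A =====
-- "{0:b}".format(m) for m ≥ 0: binary digits, most significant first ("0" for 0).
def bitsLSB (m : Nat) : List Char :=
  if h : m = 0 then []
  else (if m % 2 = 1 then '1' else '0') :: bitsLSB (m / 2)
decreasing_by exact Nat.div_lt_self (Nat.pos_of_ne_zero h) one_lt_two

def fmtBin (m : Nat) : List Char := if m = 0 then ['0'] else (bitsLSB m).reverse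

def to_color (n : Int) : Int × Int × Int :=
  -- "{0:b}".format(n); exact for n ≥ 0 (Pre_): on negative n Python raises ValueError (int('-'))
  let colorStr : List Char := fmtBin n.toNat
  let size : Int := colorStr.length
  let rgb := (PySem.List.pyRange (size - 1) (-1) (-1)).foldl
    (fun (s : Int × Int × Int) i =>
      -- int(color_str[i]): the digits are '0'/'1', so truthy iff the char is '1'; the index is always in range
      if PySem.List.pyGetD colorStr i ' ' = '1' then
        let step := PySem.Int.mod (size - 1 - i) 3
        if step = 0 then (PySem.Int.floordiv s.1 2, s.2.1, s.2.2)
        else if step = 1 then (s.1, PySem.Int.floordiv s.2.1 2, s.2.2)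
        else if step = 2 then (s.1, s.2.1, PySem.Int.floordiv s.2.2 2)
        else s
      else s)
    (255, 255, 255)
  (rgb.2.2, rgb.2.1, rgb.1)

-- ===== PORT B =====
def to_color_alt (n : Int) : Int × Int × Int :=
  let k : Nat := (PySem.Int.bitLength n + 2) / 3      -- (n.bit_length() + 2) // 3, both sides ≥ 0
  let m : Int := PySem.Int.floordiv (8 ^ k - 1) 7     -- (8 ** k - 1) // 7
  let r : Int := (255 : Int) >>> PySem.Int.bitCount (PySem.Int.band n m)
  let g : Int := (255 : Int) >>> PySem.Int.bitCount (PySem.Int.band n (m <<< (1 : Nat)))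
  let b : Int := (255 : Int) >>> PySem.Int.bitCount (PySem.Int.band n (m <<< (2 : Nat)))
  (b, g, r)

-- ===== PRECONDITION & SPEC =====
-- Pre_ excludes negative n, on which A raises ValueError (int('-') on the sign character).
def Pre_to_color (n : Int) : Prop := 0 ≤ n
instance (n : Int) : Decidable (Pre_to_color n) := by unfold Pre_to_color; infer_instance
def pvWitness_to_color : Int := 6

def Spec_to_color (n : Int) (out : Int × Int × Int) : Prop := out = to_color_alt n
instance (n : Int) (out : Int × Int × Int) : Decidable (Spec_to_color n out) := by unfold Spec_to_color; infer_instance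

-- ===== CLAIM (what is proved, stated in full; the proofs are below) =====
def Claim_equal_to_color : Prop := ∀ (n : Int), Dom_to_color n → Pre_to_color n → Spec_to_color n (to_color n)

-- ===== LEMMAS AND PROOFS =====

def pvF (c : Nat) : Int := ((255 / 2 ^ c : Nat) : Int)

theorem pvF_half (c : Nat) : PySem.Int.floordiv (pvF c) 2 = pvF (c + 1) := by
  simp [PySem.Int.floordiv, pvF, Int.fdiv_eq_ediv]
  rw [pow_succ]; exact Int.ediv_ediv_of_nonneg (by positivity)

theorem pvF_half' (c : Nat) : pvF c / 2 = pvF (c + 1) := by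
  have h := pvF_half c
  simpa [PySem.Int.floordiv, Int.fdiv_eq_ediv] using h

theorem pvRange_neg (k : Nat) :
    PySem.List.pyRange ((k : Int) - 1) (-1) (-1) = (List.range k).map (fun j : Nat => (k : Int) - 1 - (j : Int)) := by
  cases k with
  | zero => simp [PySem.List.pyRange]
  | succ k =>
      simp only [PySem.List.pyRange]
      rw [if_neg (show ¬ ((-1:Int) = 0) by norm_num), if_neg (show ¬ ((0:Int) < -1) by norm_num),
          if_pos (show (-1:Int) < ((k.succ : Nat):Int) - 1 by push_cast; omega)]
      rw [show ((((k.succ : Nat):Int) - 1) - -1 + - -1 - 1) / - -1 = ((k.succ : Nat) : Int) by push_cast; norm_num]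
      rw [Int.toNat_natCast]
      exact List.map_congr_left fun j _ => by push_cast; ring

theorem pvMod3 (j : Nat) : PySem.Int.mod (j : Int) 3 = ((j % 3 : Nat) : Int) := by
  simp [PySem.Int.mod, Int.fmod_eq_emod]

theorem pvGet_rev {α : Type} (l : List α) (d : α) (j : Nat) (hj : j < l.length) :
    PySem.List.pyGetD l ((l.length : Int) - 1 - (j : Int)) d = l.reverse.getD j d := by
  rw [show ((l.length : Int) - 1 - (j : Int)) = ((l.length - 1 - j : Nat) : Int) by omega,
      PySem.List.pyGetD_natCast]
  rw [List.getD_eq_getElem l d (by omega), List.getD_eq_getElem _ d (by simpa using hj)]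
  rw [List.getElem_reverse]

-- count of positions j < m with ch j = '1' and j % 3 = i
def pvCnt (ch : Nat → Char) (m i : Nat) : Nat :=
  (List.range m).countP (fun j => decide (ch j = '1' ∧ j % 3 = i))

-- A's halving loop over positions 0..m-1 computes pvF of those counts
theorem pvMainA (ch : Nat → Char) (m : Nat) :
    (List.range m).foldl (fun (s : Int × Int × Int) (j : Nat) =>
        if ch j = '1' then
          (if ((j % 3 : Nat) : Int) = 0 then (PySem.Int.floordiv s.1 2, s.2.1, s.2.2)
           else if ((j % 3 : Nat) : Int) = 1 then (s.1, PySem.Int.floordiv s.2.1 2, s.2.2)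
           else if ((j % 3 : Nat) : Int) = 2 then (s.1, s.2.1, PySem.Int.floordiv s.2.2 2)
           else s)
        else s) (255, 255, 255)
      = (pvF (pvCnt ch m 0), pvF (pvCnt ch m 1), pvF (pvCnt ch m 2)) := by
  induction m with
  | zero => simp [pvCnt, pvF]
  | succ m ih =>
      rw [List.range_succ]
      simp only [List.foldl_append, List.foldl_cons, List.foldl_nil, ih]
      have hcnt : ∀ i, pvCnt ch (m + 1) i = pvCnt ch m i + (if ch m = '1' ∧ m % 3 = i then 1 else 0) := by
        intro i
        rw [pvCnt, pvCnt, List.range_succ, List.countP_append]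
        by_cases h : (ch m = '1' ∧ m % 3 = i) <;> simp [h]
      by_cases hc : ch m = '1'
      · have h3 : m % 3 = 0 ∨ m % 3 = 1 ∨ m % 3 = 2 := by omega
        rcases h3 with h3 | h3 | h3 <;>
          simp [hc, h3, hcnt, pvF_half']
      · simp [hc, hcnt]

-- the digit list of x, LSB first: length and content
theorem pvLen_bitsLSB (x : Nat) : (bitsLSB x).length = PySem.Int.bitLength (x : Int) := by
  induction x using Nat.strong_induction_on with
  | _ x ih =>
      rw [bitsLSB]
      by_cases hx : x = 0
      · simp [hx, PySem.Int.bitLength_zero]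
      · rw [dif_neg hx]
        have hlt : x / 2 < x := Nat.div_lt_self (Nat.pos_of_ne_zero hx) one_lt_two
        rw [PySem.Int.bitLength_natCast (Nat.pos_of_ne_zero hx)]
        simp [ih _ hlt]

theorem pvGetD_bitsLSB (x j : Nat) (hj : j < (bitsLSB x).length) :
    (bitsLSB x).getD j ' ' = if x.testBit j then '1' else '0' := by
  induction x using Nat.strong_induction_on generalizing j with
  | _ x ih =>
      by_cases hx : x = 0
      · rw [bitsLSB] at hj; simp [hx] at hj
      · have hlt : x / 2 < x := Nat.div_lt_self (Nat.pos_of_ne_zero hx) one_lt_two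
        rw [bitsLSB, dif_neg hx] at hj ⊢
        cases j with
        | zero =>
            simp only [List.getD_cons_zero, Nat.testBit_zero]
            split_ifs with h1 h2 h2 <;> simp_all
        | succ j =>
            simp only [List.getD_cons_succ, Nat.testBit_succ]
            exact ih _ hlt j (by simpa using hj)

-- popcount as a countP of test bits
theorem pvBitCount (N : Nat) : ∀ (y : Nat), y < 2 ^ N →
    PySem.Int.bitCount (y : Int) = (List.range N).countP (fun j => y.testBit j) := by
  induction N with
  | zero =>
      intro y hy
      interval_cases y
      simp [PySem.Int.bitCount_zero]
  | succ N ih =>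
      intro y hy
      by_cases hy0 : y = 0
      · simp [hy0, PySem.Int.bitCount_zero, Nat.zero_testBit]
      · rw [PySem.Int.bitCount_natCast (Nat.pos_of_ne_zero hy0)]
        rw [List.range_succ_eq_map, List.countP_cons, List.countP_map]
        have h2 : y / 2 < 2 ^ N := by
          rw [pow_succ] at hy; omega
        rw [ih (y / 2) h2]
        have hsucc : (List.range N).countP ((fun j => y.testBit j) ∘ Nat.succ)
             = (List.range N).countP (fun j => (y / 2).testBit j) :=
          List.countP_congr fun a _ => by simp [Function.comp, Nat.testBit_succ]
        rw [hsucc]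
        have ht : (if y.testBit 0 = true then 1 else 0) = y % 2 := by
          rcases Nat.mod_two_eq_zero_or_one y with h | h <;> simp [Nat.testBit_zero, h]
        omega

-- the stride mask (8^k - 1) / 7 has exactly the bits at positions ≡ 0 (mod 3) below 3k
theorem pvMaskBit (k : Nat) : ∀ (j : Nat),
    ((8 ^ k - 1) / 7).testBit j = decide (j < 3 * k ∧ j % 3 = 0) := by
  induction k with
  | zero => intro j; simp
  | succ k ih =>
      intro j
      have h7 : 8 ^ k % 7 = 1 := by
        rw [Nat.pow_mod]; simp
      have h1 : 1 ≤ 8 ^ k := Nat.one_le_pow _ _ (by norm_num)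
      have hM : (8 ^ (k + 1) - 1) / 7 = 8 * ((8 ^ k - 1) / 7) + 1 := by
        rw [pow_succ]; omega
      rw [hM]
      set M := (8 ^ k - 1) / 7 with hMdef
      rcases j with _ | (_ | (_ | j))
      · simp only [Nat.testBit_zero, decide_eq_decide, and_true, Nat.zero_mod]; omega
      · rw [Nat.testBit_succ, show (8 * M + 1) / 2 = 4 * M by omega]
        simp only [Nat.testBit_zero, decide_eq_decide]; omega
      · rw [Nat.testBit_succ, show (8 * M + 1) / 2 = 4 * M by omega,
            Nat.testBit_succ, show (4 * M) / 2 = 2 * M by omega]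
        simp only [Nat.testBit_zero, decide_eq_decide]; omega
      · rw [Nat.testBit_succ, show (8 * M + 1) / 2 = 4 * M by omega,
            Nat.testBit_succ, show (4 * M) / 2 = 2 * M by omega,
            Nat.testBit_succ, show (2 * M) / 2 = M by omega, ih j]
        simp only [decide_eq_decide]; omega

theorem pvCountP_ext (p : Nat → Bool) (L N : Nat) (h : L ≤ N) (hz : ∀ j, L ≤ j → p j = false) :
    (List.range N).countP p = (List.range L).countP p := by
  rw [show N = L + (N - L) by omega, List.range_add, List.countP_append]
  have : ((List.range (N - L)).map (L + ·)).countP p = 0 := by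
    rw [List.countP_map]
    simp only [List.countP_eq_zero]
    intro a _
    simp [hz (L + a) (by omega)]
  omega

-- each channel's popcount equals the per-residue bit count below the bit length
theorem pvChannel (x k i : Nat) (hi : i < 3) (hk : PySem.Int.bitLength (x : Int) ≤ 3 * k) :
    PySem.Int.bitCount (((x &&& (((8 ^ k - 1) / 7) <<< i)) : Nat) : Int)
      = (List.range (PySem.Int.bitLength (x : Int))).countP
          (fun j => decide (x.testBit j ∧ j % 3 = i)) := by
  set L := PySem.Int.bitLength (x : Int) with hL
  have hx : x < 2 ^ L := by
    have := PySem.Int.lt_two_pow_bitLength (x : Int)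
    simpa using this
  have hband : x &&& (((8 ^ k - 1) / 7) <<< i) < 2 ^ (3 * k) :=
    lt_of_le_of_lt Nat.and_le_left (lt_of_lt_of_le hx (Nat.pow_le_pow_right (by norm_num) hk))
  rw [pvBitCount (3 * k) _ hband]
  have hcongr : (List.range (3 * k)).countP (fun j => (x &&& (((8 ^ k - 1) / 7) <<< i)).testBit j)
      = (List.range (3 * k)).countP (fun j => decide (x.testBit j ∧ j % 3 = i)) := by
    refine List.countP_congr fun j hj => ?_
    rw [List.mem_range] at hj
    rw [Nat.testBit_and, Nat.testBit_shiftLeft, pvMaskBit]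
    cases hb : x.testBit j
    · simp
    · simp only [Bool.true_and, Bool.and_eq_true, decide_eq_true_eq, true_and]
      omega
  rw [hcongr]
  exact pvCountP_ext _ L (3 * k) hk (fun j hjL => by
    simp only [decide_eq_false_iff_not, not_and]
    intro hbit
    exact absurd hbit (by simp [Nat.testBit_lt_two_pow (lt_of_lt_of_le hx (Nat.pow_le_pow_right (by norm_num) hjL))]))

-- ===== VERDICT (by name: the statement is the Claim_ definition above) =====
theorem to_color_spec : Claim_equal_to_color := by
  intro n _ hpre
  unfold Spec_to_color
  obtain ⟨x, rfl⟩ : ∃ x : Nat, n = (x : Int) := ⟨n.toNat, (Int.toNat_of_nonneg hpre).symm⟩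
  by_cases hx0 : x = 0
  · subst hx0; decide
  · simp only [to_color, to_color_alt]
    rw [Int.toNat_natCast]
    have hrev : (fmtBin x).reverse = bitsLSB x := by
      simp [fmtBin, hx0]
    set l := fmtBin x with hl
    set L := l.length with hLdef
    have hLbits : (bitsLSB x).length = PySem.Int.bitLength (x : Int) := pvLen_bitsLSB x
    have hLL : L = PySem.Int.bitLength (x : Int) := by
      rw [hLdef, ← hLbits, ← hrev, List.length_reverse]
    -- A side: rewrite the countdown fold into a fold over List.range L
    rw [show (l.length : Int) = (L : Int) by rw [hLdef]]
    rw [pvRange_neg L, List.foldl_map]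
    rw [PySem.List.foldl_congr_mem _ _
        (fun (s : Int × Int × Int) (j : Nat) =>
          if l.reverse.getD j ' ' = '1' then
            (if ((j % 3 : Nat) : Int) = 0 then (PySem.Int.floordiv s.1 2, s.2.1, s.2.2)
             else if ((j % 3 : Nat) : Int) = 1 then (s.1, PySem.Int.floordiv s.2.1 2, s.2.2)
             else if ((j % 3 : Nat) : Int) = 2 then (s.1, s.2.1, PySem.Int.floordiv s.2.2 2)
             else s)
          else s) _
        (by
          intro acc j hj
          rw [List.mem_range] at hj
          rw [show ((L : Int) - 1 - ((L : Int) - 1 - (j : Int))) = (j : Int) by ring]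
          rw [hLdef] at hj ⊢
          rw [pvGet_rev l ' ' j hj, pvMod3])]
    rw [pvMainA]
    -- the counts are the per-residue bit counts
    have hcnt : ∀ i, i < 3 → pvCnt (fun j => l.reverse.getD j ' ') L i
        = (List.range (PySem.Int.bitLength (x : Int))).countP
            (fun j => decide (x.testBit j ∧ j % 3 = i)) := by
      intro i _
      rw [pvCnt, ← hLL]
      refine List.countP_congr fun j hj => ?_
      rw [List.mem_range] at hj
      rw [hrev, pvGetD_bitsLSB x j (by rw [hLbits, ← hLL]; exact hj)]
      by_cases hb : x.testBit j <;> simp [hb]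
    -- B side: reduce everything to Nat
    have h8 : ((8 : Int) ^ ((PySem.Int.bitLength (x : Int) + 2) / 3) - 1)
        = (((8 ^ ((PySem.Int.bitLength (x : Int) + 2) / 3) - 1 : Nat)) : Int) := by
      have h1 : 1 ≤ 8 ^ ((PySem.Int.bitLength (x : Int) + 2) / 3) := Nat.one_le_pow _ _ (by norm_num)
      push_cast [h1]
      ring
    set k := (PySem.Int.bitLength (x : Int) + 2) / 3 with hk
    have hm : PySem.Int.floordiv ((8 : Int) ^ k - 1) 7 = (((8 ^ k - 1) / 7 : Nat) : Int) := by
      rw [h8]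
      exact_mod_cast PySem.Int.floordiv_natCast (8 ^ k - 1) 7
    have hkL : PySem.Int.bitLength (x : Int) ≤ 3 * k := by omega
    simp only [hm]
    have hsh : ∀ (mm s : Nat), ((mm : Int) <<< s) = ((mm <<< s : Nat) : Int) := fun mm s => by simp
    have e0 : PySem.Int.band (x : Int) ((((8 ^ k - 1) / 7 : Nat)) : Int)
        = (((x &&& (((8 ^ k - 1) / 7) <<< 0)) : Nat) : Int) := by
      rw [Nat.shiftLeft_zero]; exact_mod_cast PySem.Int.band_natCast x ((8 ^ k - 1) / 7)
    have e1 : PySem.Int.band (x : Int) (((((8 ^ k - 1) / 7 : Nat)) : Int) <<< (1 : Nat))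
        = (((x &&& (((8 ^ k - 1) / 7) <<< 1)) : Nat) : Int) := by
      rw [hsh]; exact_mod_cast PySem.Int.band_natCast x (((8 ^ k - 1) / 7) <<< 1)
    have e2 : PySem.Int.band (x : Int) (((((8 ^ k - 1) / 7 : Nat)) : Int) <<< (2 : Nat))
        = (((x &&& (((8 ^ k - 1) / 7) <<< 2)) : Nat) : Int) := by
      rw [hsh]; exact_mod_cast PySem.Int.band_natCast x (((8 ^ k - 1) / 7) <<< 2)
    rw [e0, e1, e2, pvChannel x k 0 (by norm_num) hkL, pvChannel x k 1 (by norm_num) hkL,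
        pvChannel x k 2 (by norm_num) hkL,
        hcnt 0 (by norm_num), hcnt 1 (by norm_num), hcnt 2 (by norm_num)]
    have hF : ∀ c : Nat, pvF c = (255 : Int) >>> c := by
      intro c
      rw [show (255 : Int) >>> c = (((255 >>> c : Nat)) : Int) by simp]
      simp [pvF, Nat.shiftRight_eq_div_pow]
    simp [hF]
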